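-- pv_equiv track=rewrite | github.com/Guille679/data-foundations | guia_04/cadenas/Ejercicio_1.py | insertar_entre
-- ===== SOURCE A (Python) =====
-- def insertar_entre(cadena, caracter, limite=None):
--     resultado = ""
--     largo = len(cadena)
--     inserciones = 0
--     for i in range(largo):
--         resultado += cadena[i]
--         if i < largo - 1:
--             if limite is None or inserciones < limite:
--                 resultado += caracter
--                 inserciones += 1
--     return resultado
-- ===== SOURCE B (Python) =====
-- def insertar_entre(cadena, caracter, limite=None):
--     n = len(cadena)
--     k = n - 1 if limite is None else max(0, min(limite, n - 1))
--     return caracter.join(cadena[:k + 1]) + cadena[k + 1:]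
-- ===== Notes on version B (the rewrite author's own statement) =====
-- stated objective: simpler
-- what changed: Replaces A's per-character loop with a running insertion counter and per-iteration branches by computing the split point k = clamp(limite, 0, n-1) up front and returning caracter.join(cadena[:k+1]) + cadena[k+1:].
import Mathlib
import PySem

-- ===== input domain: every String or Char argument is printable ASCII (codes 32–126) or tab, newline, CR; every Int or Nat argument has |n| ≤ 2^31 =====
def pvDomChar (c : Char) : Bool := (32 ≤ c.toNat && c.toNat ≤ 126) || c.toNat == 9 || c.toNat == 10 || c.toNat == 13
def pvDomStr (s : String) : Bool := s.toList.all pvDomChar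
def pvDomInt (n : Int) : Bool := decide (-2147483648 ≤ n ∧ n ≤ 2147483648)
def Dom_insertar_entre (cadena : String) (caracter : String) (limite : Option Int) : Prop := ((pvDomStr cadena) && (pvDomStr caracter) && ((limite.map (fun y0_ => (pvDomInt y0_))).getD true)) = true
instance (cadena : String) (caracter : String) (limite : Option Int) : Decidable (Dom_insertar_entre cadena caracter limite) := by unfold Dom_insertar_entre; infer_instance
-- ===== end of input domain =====

-- B replaces A's per-character loop with a running insertion counter by a split point computed
-- up front (k = clamped limite) and one join over the head slice plus the verbatim tail (simpler).

-- ===== PORT A =====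
-- literal transliteration of A: loop over range(len(cadena)), state (resultado, inserciones)
def insertar_entre (cadena : String) (caracter : String) (limite : Option Int) : String :=
  let largo : Int := PySem.Str.len cadena
  let st := (PySem.List.pyRange 0 largo 1).foldl
    (fun (st : List Char × Int) i =>
      let res := st.1 ++ [PySem.List.pyGetD cadena.toList i ' ']
      if i < largo - 1 then
        if limite.isNone || st.2 < limite.getD 0 then
          (res ++ caracter.toList, st.2 + 1)
        else (res, st.2)
      else (res, st.2))
    (([] : List Char), (0 : Int))
  String.ofList st.1

-- ===== PORT B =====
-- literal transliteration of B: k = clamped limite; caracter.join(cadena[:k+1]) + cadena[k+1:]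
def insertar_entre_alt (cadena : String) (caracter : String) (limite : Option Int) : String :=
  let n : Int := PySem.Str.len cadena
  let k : Int := match limite with
    | none => n - 1
    | some l => max 0 (min l (n - 1))
  String.ofList
    (PySem.Chars.join caracter.toList
        ((PySem.List.slice cadena.toList none (some (k + 1))).map (fun c => [c]))
      ++ PySem.List.slice cadena.toList (some (k + 1)) none)

-- ===== PRECONDITION & SPEC =====
def Spec_insertar_entre (cadena : String) (caracter : String) (limite : Option Int) (out : String) : Prop := out = insertar_entre_alt cadena caracter limite
instance (cadena : String) (caracter : String) (limite : Option Int) (out : String) : Decidable (Spec_insertar_entre cadena caracter limite out) := by unfold Spec_insertar_entre; infer_instance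

-- ===== CLAIM (what is proved, stated in full; the proofs are below) =====
def Claim_equal_insertar_entre : Prop := ∀ (cadena : String) (caracter : String) (limite : Option Int), Dom_insertar_entre cadena caracter limite → Spec_insertar_entre cadena caracter limite (insertar_entre cadena caracter limite)

-- ===== LEMMAS AND PROOFS =====

/-- Reference recursion: `cadena` with `sep` inserted after each char while the
(optional) budget lasts. Used only by the proofs, as a bridge between the two ports. -/
def pvSep (sep : List Char) : List Char → Option Int → List Char
  | [], _ => []
  | [c], _ => [c]
  | c :: d :: rest, none => c :: (sep ++ pvSep sep (d :: rest) none)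
  | c :: d :: rest, some l =>
      if 0 < l then c :: (sep ++ pvSep sep (d :: rest) (some (l - 1)))
      else c :: d :: rest

/-- A's loop body, named so the fold lemmas can rewrite it. -/
def pvStepA (sep : List Char) (lim : Option Int) (n : Int)
    (st : List Char × Int) (p : Int × Char) : List Char × Int :=
  let res := st.1 ++ [p.2]
  if p.1 < n - 1 then
    if lim.isNone || st.2 < lim.getD 0 then (res ++ sep, st.2 + 1) else (res, st.2)
  else (res, st.2)

lemma pvSep_nonpos (sep : List Char) (cs : List Char) {l : Int} (hl : ¬ 0 < l) :
    pvSep sep cs (some l) = cs := by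
  match cs with
  | [] => rfl
  | [c] => rfl
  | c :: d :: rest => simp [pvSep, hl]

lemma enumerate_cons {α : Type} (a : α) (xs : List α) (s : Int) :
    PySem.List.enumerate (a :: xs) s = (s, a) :: PySem.List.enumerate xs (s + 1) := by
  simp [PySem.List.enumerate]

/-- The A-side loop, run over `enumerate cs s`, appends `pvSep` of the remaining
characters to the accumulator; `n` is the total length, `l - ins` the remaining budget. -/
lemma loopA (sep : List Char) (lim : Option Int) (n : Int) :
    ∀ (cs : List Char) (s : Int), s + cs.length = n → ∀ (ins : Int) (acc : List Char),
    ((PySem.List.enumerate cs s).foldl (pvStepA sep lim n) (acc, ins)).1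
      = acc ++ pvSep sep cs (lim.map (fun l => l - ins)) := by
  intro cs
  induction cs with
  | nil => intro s hs ins acc; cases lim <;> simp [PySem.List.enumerate, pvSep]
  | cons c rest ih =>
    intro s hs ins acc
    rw [enumerate_cons, List.foldl_cons]
    match rest with
    | [] =>
      have hsn : ¬ (s < n - 1) := by simp at hs; omega
      cases lim <;> simp [PySem.List.enumerate, pvSep, pvStepA, hsn]
    | d :: rest' =>
      have hlt : s < n - 1 := by simp at hs; omega
      have hs' : (s + 1) + ((d :: rest').length : Int) = n := by
        simp at hs ⊢; omega
      cases lim with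
      | none =>
        have hstep : pvStepA sep none n (acc, ins) (s, c)
            = (acc ++ [c] ++ sep, ins + 1) := by
          simp [pvStepA, hlt]
        rw [hstep, ih (s + 1) hs' (ins + 1) (acc ++ [c] ++ sep)]
        simp [pvSep]
      | some l =>
        by_cases hins : ins < l
        · have hstep : pvStepA sep (some l) n (acc, ins) (s, c)
              = (acc ++ [c] ++ sep, ins + 1) := by
            simp [pvStepA, hlt, hins]
          rw [hstep, ih (s + 1) hs' (ins + 1) (acc ++ [c] ++ sep)]
          have h0 : (0:Int) < l - ins := by omega
          have h1 : l - (ins + 1) = l - ins - 1 := by omega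
          simp only [Option.map_some, pvSep, h0, if_true, h1]
          simp
        · have hstep : pvStepA sep (some l) n (acc, ins) (s, c)
              = (acc ++ [c], ins) := by
            simp [pvStepA, hlt, hins]
          rw [hstep, ih (s + 1) hs' ins (acc ++ [c])]
          have h0 : ¬ (0:Int) < l - ins := by omega
          simp only [Option.map_some, pvSep, h0, if_false,
            pvSep_nonpos sep (d :: rest') h0]
          simp

/-- B-side, no limit: joining all characters equals `pvSep … none`. -/
lemma pvSep_none (sep : List Char) :
    ∀ cs : List Char, pvSep sep cs none = PySem.Chars.join sep (cs.map (fun c => [c])) := by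
  intro cs
  induction cs with
  | nil => simp [pvSep, PySem.Chars.join_nil]
  | cons c rest ih =>
    match rest with
    | [] => simp [pvSep, PySem.Chars.join_singleton]
    | d :: rest' =>
      rw [pvSep, ih,
        show (List.map (fun c => [c]) (c :: d :: rest') : List (List Char))
            = [c] :: [d] :: List.map (fun c => [c]) rest' from rfl,
        PySem.Chars.join_cons_cons]
      simp

/-- B-side, with limit `l`: `pvSep` equals join of the head slice plus the verbatim tail,
where the split point is the clamped limit. -/
lemma pvSep_some (sep : List Char) :
    ∀ (cs : List Char) (l : Int),
    pvSep sep cs (some l)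
      = PySem.Chars.join sep
          ((cs.take (max 0 (min l ((cs.length : Int) - 1)) + 1).toNat).map (fun c => [c]))
        ++ cs.drop (max 0 (min l ((cs.length : Int) - 1)) + 1).toNat := by
  intro cs
  induction cs with
  | nil => intro l; simp [pvSep, PySem.Chars.join_nil]
  | cons c rest ih =>
    intro l
    match rest with
    | [] =>
      simp [pvSep, PySem.Chars.join_singleton]
    | d :: rest' =>
      by_cases hl : 0 < l
      · set m : Int := min l ((rest'.length : Int) + 1) with hm
        have hm1 : 1 ≤ m := by omega
        have hk : max 0 (min l (((c :: d :: rest').length : Int) - 1)) = m := by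
          simp only [List.length_cons]; push_cast; omega
        have hk2 : max 0 (min (l - 1) (((d :: rest').length : Int) - 1)) = m - 1 := by
          simp only [List.length_cons]; push_cast; omega
        rw [pvSep, if_pos hl, ih (l - 1), hk2, hk]
        set a : Nat := m.toNat with ha
        have ha1 : (m + 1).toNat = a + 1 := by omega
        have ha2 : (m - 1 + 1).toNat = a := by omega
        have ha3 : a = (a - 1) + 1 := by omega
        rw [ha1, ha2, List.take_succ_cons, List.drop_succ_cons, ha3,
          List.take_succ_cons, List.drop_succ_cons]
        simp [PySem.Chars.join_cons_cons]
      · have hk : max 0 (min l (((c :: d :: rest').length : Int) - 1)) = 0 := by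
          simp only [List.length_cons]; push_cast; omega
        rw [pvSep, if_neg hl, hk]
        norm_num

-- ===== VERDICT (by name: the statement is the Claim_ definition above) =====
theorem insertar_entre_spec : Claim_equal_insertar_entre := by
  intro cadena caracter limite _
  unfold Spec_insertar_entre insertar_entre insertar_entre_alt
  simp only [PySem.Str.len_eq]
  have hen := PySem.List.enumerate_eq_map_pyRange cadena.toList ' '
  rw [PySem.List.len_eq] at hen
  have hfold :
      (PySem.List.pyRange 0 (cadena.toList.length : Int) 1).foldl
        (fun (st : List Char × Int) i =>
          if i < (cadena.toList.length : Int) - 1 then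
            if limite.isNone || st.2 < limite.getD 0 then
              (st.1 ++ [PySem.List.pyGetD cadena.toList i ' '] ++ caracter.toList, st.2 + 1)
            else (st.1 ++ [PySem.List.pyGetD cadena.toList i ' '], st.2)
          else (st.1 ++ [PySem.List.pyGetD cadena.toList i ' '], st.2))
        (([] : List Char), (0 : Int))
      = (PySem.List.enumerate cadena.toList 0).foldl
          (pvStepA caracter.toList limite (cadena.toList.length : Int))
          (([] : List Char), (0 : Int)) := by
    rw [hen, List.foldl_map]
    rfl
  have hloop := loopA caracter.toList limite (cadena.toList.length : Int)
    cadena.toList 0 (by simp) 0 []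
  refine congrArg String.ofList (Eq.trans (congrArg Prod.fst hfold) (Eq.trans hloop ?_))
  have hmap : limite.map (fun l => l - 0) = limite := by cases limite <;> simp
  rw [List.nil_append, hmap]
  cases limite with
  | none =>
    rw [pvSep_none caracter.toList cadena.toList]
    have h1 : (cadena.toList.length : Int) - 1 + 1 = (cadena.toList.length : Int) := by ring
    rw [h1, PySem.List.slice_to cadena.toList (by positivity),
      PySem.List.slice_from cadena.toList (by positivity)]
    have hT : ((cadena.toList.length : Int)).toNat = cadena.toList.length := by omega
    rw [hT, List.take_length, List.drop_length, List.append_nil]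
  | some l =>
    rw [pvSep_some caracter.toList cadena.toList l]
    have hnn : (0:Int) ≤ max 0 (min l ((cadena.toList.length : Int) - 1)) + 1 := by
      have := le_max_left (0:Int) (min l ((cadena.toList.length : Int) - 1)); omega
    rw [PySem.List.slice_to cadena.toList hnn, PySem.List.slice_from cadena.toList hnn]
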